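-- pv_equiv track=rewrite | github.com/EYO-07/QtRogueLike | globals_variables.py | Generate_Square_Spiral_Traversal_Diffs
-- ===== SOURCE A (Python) =====
-- def Generate_Square_Spiral_Traversal_Diffs(radius=3):
--     """
--     Generate (x, y) coordinate offsets in a square spiral order
--     starting from (0, 0) within a square of side length 2*radius - 1.
--
--     Parameters:
--         radius (int): Distance from center to edge (half side-length + 1)
--
--     Returns:
--         List[Tuple[int, int]]: Spiral-ordered (x, y) coordinates
--     """
--     max_distance = radius - 1
--     x, y = 0, 0
--     dx, dy = 1, 0  # Initial direction: right
--     spiral = [(x, y)]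
--     step_size = 1  # Number of steps in current direction
--     direction_changes = 0
--     while True:
--         for _ in range(2):  # Repeat each step size twice (e.g., right, down; then step_size++)
--             for _ in range(step_size):
--                 x += dx
--                 y += dy
--                 if abs(x) <= max_distance and abs(y) <= max_distance:
--                     spiral.append((x, y))
--                 else:
--                     return spiral  # Exit if out of bounds
--             # Rotate direction clockwise
--             dx, dy = -dy, dx
--             direction_changes += 1
--         step_size += 1
-- ===== SOURCE B (Python) =====
-- def Generate_Square_Spiral_Traversal_Diffs(radius=3):
--     """Ring-by-ring construction: emit the center, then each concentric ring's
--     right, top, left and bottom sides directly by comprehension, with no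
--     direction/step-size walking state."""
--     spiral = [(0, 0)]
--     for k in range(1, radius):
--         n = 2 * k
--         spiral += [(k, -k + 1 + t) for t in range(n)]
--         spiral += [(k - 1 - t, k) for t in range(n)]
--         spiral += [(-k, k - 1 - t) for t in range(n)]
--         spiral += [(-k + 1 + t, -k) for t in range(n)]
--     return spiral
-- ===== Notes on version B (the rewrite author's own statement) =====
-- stated objective: alternative
-- what changed: B replaces A's stateful path-walking (dx/dy direction, step_size, per-point bounds check with early return) by emitting the center and then each concentric ring's four sides directly as comprehensions.
import Mathlib
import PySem

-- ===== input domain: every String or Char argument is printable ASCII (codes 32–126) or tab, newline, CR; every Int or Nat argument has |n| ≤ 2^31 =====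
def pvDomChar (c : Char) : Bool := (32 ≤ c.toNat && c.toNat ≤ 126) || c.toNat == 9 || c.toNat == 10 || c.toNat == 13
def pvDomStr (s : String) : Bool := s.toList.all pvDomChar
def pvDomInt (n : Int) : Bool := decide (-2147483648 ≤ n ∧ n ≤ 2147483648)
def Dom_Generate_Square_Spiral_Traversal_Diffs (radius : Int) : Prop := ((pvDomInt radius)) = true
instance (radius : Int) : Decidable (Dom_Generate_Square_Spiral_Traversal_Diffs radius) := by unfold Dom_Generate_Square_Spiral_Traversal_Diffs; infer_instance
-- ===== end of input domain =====

-- B replaces A's stateful direction/step-size path walking by emitting each concentric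
-- ring's four sides directly by comprehension (same asymptotic cost, no walking state).

-- ===== PORT A =====
-- inner 'for _ in range(step_size)' of A: walk n steps in direction (dx,dy), appending
-- in-box points; .inl = Python's early 'return spiral', .inr = loop finished with new state
def spiralPhase (maxd : Int) (x y dx dy : Int) : Nat → List (Int × Int) → Sum (List (Int × Int)) (Int × Int × List (Int × Int))
  | 0, sp => Sum.inr (x, y, sp)
  | n + 1, sp =>
    if |x + dx| ≤ maxd ∧ |y + dy| ≤ maxd then
      spiralPhase maxd (x + dx) (y + dy) dx dy n (sp ++ [(x + dx, y + dy)])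
    else Sum.inl sp

-- 'while True' of A, with a fuel guard making the same computation total (fuel is
-- provably sufficient: see spiralLoop_run below); the body does the two phases of
-- 'for _ in range(2)' with the clockwise rotation (dx,dy) -> (-dy,dx) between/after,
-- then step_size += 1 (the dead variable direction_changes is dropped)
def spiralLoop : Nat → Int → Int → Int → Int → Int → Nat → List (Int × Int) → List (Int × Int)
  | 0, _, _, _, _, _, _, sp => sp
  | fuel + 1, maxd, x, y, dx, dy, step, sp =>
    match spiralPhase maxd x y dx dy step sp with
    | Sum.inl s => s
    | Sum.inr (x1, y1, s1) =>
      match spiralPhase maxd x1 y1 (-dy) dx step s1 with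
      | Sum.inl s => s
      | Sum.inr (x2, y2, s2) => spiralLoop fuel maxd x2 y2 (-dx) (-dy) (step + 1) s2

def Generate_Square_Spiral_Traversal_Diffs (radius : Int) : List (Int × Int) :=
  spiralLoop (2 * radius.toNat + 1) (radius - 1) 0 0 1 0 1 [(0, 0)]

-- ===== PORT B =====
def Generate_Square_Spiral_Traversal_Diffs_alt (radius : Int) : List (Int × Int) :=
  (PySem.List.pyRange 1 radius 1).foldl
    (fun sp k =>
      (((sp ++ (PySem.List.pyRange 0 (2 * k) 1).map (fun t => (k, -k + 1 + t)))
            ++ (PySem.List.pyRange 0 (2 * k) 1).map (fun t => (k - 1 - t, k)))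
          ++ (PySem.List.pyRange 0 (2 * k) 1).map (fun t => (-k, k - 1 - t)))
        ++ (PySem.List.pyRange 0 (2 * k) 1).map (fun t => (-k + 1 + t, -k)))
    [(0, 0)]

-- ===== PRECONDITION & SPEC =====
def Spec_Generate_Square_Spiral_Traversal_Diffs (radius : Int) (out : List (Int × Int)) : Prop := out = Generate_Square_Spiral_Traversal_Diffs_alt radius
instance (radius : Int) (out : List (Int × Int)) : Decidable (Spec_Generate_Square_Spiral_Traversal_Diffs radius out) := by unfold Spec_Generate_Square_Spiral_Traversal_Diffs; infer_instance

-- ===== CLAIM (what is proved, stated in full; the proofs are below) =====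
def Claim_equal_Generate_Square_Spiral_Traversal_Diffs : Prop := ∀ (radius : Int), Dom_Generate_Square_Spiral_Traversal_Diffs radius → Spec_Generate_Square_Spiral_Traversal_Diffs radius (Generate_Square_Spiral_Traversal_Diffs radius)

-- ===== LEMMAS AND PROOFS =====

def seg (x y dx dy : Int) : Nat → List (Int × Int)
  | 0 => []
  | n + 1 => (x + dx, y + dy) :: seg (x + dx) (y + dy) dx dy n

theorem map_range_ext {α : Type} (n : Nat) (f g : Nat → α) (h : ∀ t, f t = g t) :
    (List.range n).map f = (List.range n).map g :=
  List.map_congr_left (fun t _ => h t)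

theorem seg_eq_map (dx dy : Int) : ∀ (n : Nat) (x y : Int),
    seg x y dx dy n = (List.range n).map (fun (t : Nat) => (x + ((t : Int) + 1) * dx, y + ((t : Int) + 1) * dy)) := by
  intro n
  induction n with
  | zero => intro x y; simp [seg]
  | succ n ih =>
    intro x y
    rw [seg, ih, List.range_succ_eq_map, List.map_cons, List.map_map]
    refine congrArg₂ _ (by simp) ?_
    apply map_range_ext
    intro t
    simp only [Function.comp_apply, Prod.mk.injEq]
    push_cast
    constructor <;> ring

theorem spiralPhase_ok (d dx dy : Int) : ∀ (n : Nat) (x y : Int) (sp : List (Int × Int)),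
    (∀ t : Nat, t < n → |x + ((t : Int) + 1) * dx| ≤ d ∧ |y + ((t : Int) + 1) * dy| ≤ d) →
    spiralPhase d x y dx dy n sp =
      Sum.inr (x + n * dx, y + n * dy, sp ++ seg x y dx dy n) := by
  intro n
  induction n with
  | zero => intro x y sp _; simp [spiralPhase, seg]
  | succ n ih =>
    intro x y sp h
    have h0 := h 0 (Nat.succ_pos n)
    simp only [Nat.cast_zero, zero_add, one_mul] at h0
    rw [spiralPhase, if_pos h0, ih (x + dx) (y + dy) _ ?_]
    · simp only [Sum.inr.injEq, Prod.mk.injEq, seg, List.append_assoc, List.singleton_append]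
      refine ⟨by push_cast; ring, by push_cast; ring, by simp⟩
    · intro t ht
      have hh := h (t + 1) (by omega)
      push_cast at hh ⊢
      refine ⟨?_, ?_⟩
      · rw [show x + dx + (↑t + 1) * dx = x + (↑t + 1 + 1) * dx by ring]; exact hh.1
      · rw [show y + dy + (↑t + 1) * dy = y + (↑t + 1 + 1) * dy by ring]; exact hh.2

theorem spiralPhase_partial (d dx dy : Int) : ∀ (k n : Nat) (x y : Int) (sp : List (Int × Int)),
    k < n →
    (∀ t : Nat, t < k → |x + ((t : Int) + 1) * dx| ≤ d ∧ |y + ((t : Int) + 1) * dy| ≤ d) →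
    ¬(|x + ((k : Int) + 1) * dx| ≤ d ∧ |y + ((k : Int) + 1) * dy| ≤ d) →
    spiralPhase d x y dx dy n sp = Sum.inl (sp ++ seg x y dx dy k) := by
  intro k
  induction k with
  | zero =>
    intro n x y sp hk h hout
    obtain ⟨n, rfl⟩ : ∃ m, n = m + 1 := ⟨n - 1, by omega⟩
    simp only [Nat.cast_zero, zero_add, one_mul] at hout
    rw [spiralPhase, if_neg hout]
    simp [seg]
  | succ k ih =>
    intro n x y sp hk h hout
    obtain ⟨n, rfl⟩ : ∃ m, n = m + 1 := ⟨n - 1, by omega⟩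
    have h0 := h 0 (Nat.succ_pos k)
    simp only [Nat.cast_zero, zero_add, one_mul] at h0
    rw [spiralPhase, if_pos h0, ih n (x + dx) (y + dy) _ (by omega) ?_ ?_]
    · simp [seg]
    · intro t ht
      have hh := h (t + 1) (by omega)
      push_cast at hh ⊢
      refine ⟨?_, ?_⟩
      · rw [show x + dx + (↑t + 1) * dx = x + (↑t + 1 + 1) * dx by ring]; exact hh.1
      · rw [show y + dy + (↑t + 1) * dy = y + (↑t + 1 + 1) * dy by ring]; exact hh.2
    · push_cast at hout ⊢
      intro ⟨h1, h2⟩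
      exact hout ⟨by rw [show x + (↑k + 1 + 1) * dx = x + dx + (↑k + 1) * dx by ring]; exact h1,
                  by rw [show y + (↑k + 1 + 1) * dy = y + dy + (↑k + 1) * dy by ring]; exact h2⟩
def lpSeg (D : Nat) : List (Int × Int) := seg (-(D : Int)) (-(D : Int)) 1 0 (2 * D)

def pairSeg (j : Nat) : List (Int × Int) :=
  seg (-(j : Int)) (-(j : Int)) 1 0 (2 * j + 1) ++
  seg ((j : Int) + 1) (-(j : Int)) 0 1 (2 * j + 1) ++
  seg ((j : Int) + 1) ((j : Int) + 1) (-1) 0 (2 * j + 2) ++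
  seg (-(j : Int) - 1) ((j : Int) + 1) 0 (-1) (2 * j + 2)

theorem flat_succ (j n : Nat) :
    pairSeg j ++ (List.range n).flatMap (fun i => pairSeg (j + 1 + i)) =
      (List.range (n + 1)).flatMap (fun i => pairSeg (j + i)) := by
  rw [List.range_succ_eq_map, List.flatMap_cons, List.flatMap_map, Nat.add_zero]
  refine congrArg₂ _ rfl (congrArg₂ _ (funext fun i => ?_) rfl)
  rw [show j + 1 + i = j + Nat.succ i by omega]

theorem spiralLoop_run (D : Nat) : ∀ (n j fuel : Nat) (sp : List (Int × Int)), j + n = D → 2 * n + 1 ≤ fuel →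
    spiralLoop fuel (D : Int) (-(j : Int)) (-(j : Int)) 1 0 (2 * j + 1) sp =
      sp ++ (List.range n).flatMap (fun i => pairSeg (j + i)) ++ lpSeg D := by
  intro n
  induction n with
  | zero =>
    intro j fuel sp hjn hfuel
    obtain ⟨f, rfl⟩ : ∃ f, fuel = f + 1 := ⟨fuel - 1, by omega⟩
    obtain rfl : j = D := by omega
    simp only [spiralLoop]
    rw [spiralPhase_partial (j : Int) 1 0 (2 * j) (2 * j + 1) _ _ _ (by omega)
        (by intro t ht; simp only [mul_one, mul_zero, add_zero, abs_le]; constructor <;> omega)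
        (by simp only [mul_one, mul_zero, add_zero, abs_le]; push_cast; omega)]
    simp [lpSeg]
  | succ n ih =>
    intro j fuel sp hjn hfuel
    obtain ⟨f, rfl⟩ : ∃ f, fuel = f + 2 := ⟨fuel - 2, by omega⟩
    have hjD : j + 1 ≤ D := by omega
    simp only [spiralLoop]
    rw [spiralPhase_ok (D : Int) 1 0 (2 * j + 1) _ _ _
        (by intro t ht; simp only [mul_one, mul_zero, add_zero, abs_le]; constructor <;> omega)]

    simp only [neg_zero, neg_neg]
    rw [spiralPhase_ok (D : Int) 0 1 (2 * j + 1) (-(j:Int) + (2 * j + 1 : Nat) * 1) (-(j:Int) + (2 * j + 1 : Nat) * 0) _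
        (by intro t ht; simp only [mul_one, mul_zero, add_zero, abs_le]; push_cast; constructor <;> omega)]
    simp only []
    rw [spiralPhase_ok (D : Int) (-1) 0 (2 * j + 1 + 1)
        (-(j:Int) + (2 * j + 1 : Nat) * 1 + (2 * j + 1 : Nat) * 0) (-(j:Int) + (2 * j + 1 : Nat) * 0 + (2 * j + 1 : Nat) * 1) _
        (by intro t ht; simp only [abs_le]; push_cast; constructor <;> omega)]
    simp only []
    rw [spiralPhase_ok (D : Int) 0 (-1) (2 * j + 1 + 1)
        (-(j:Int) + (2 * j + 1 : Nat) * 1 + (2 * j + 1 : Nat) * 0 + (2 * j + 1 + 1 : Nat) * -1)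
        (-(j:Int) + (2 * j + 1 : Nat) * 0 + (2 * j + 1 : Nat) * 1 + (2 * j + 1 + 1 : Nat) * 0) _
        (by intro t ht; simp only [abs_le]; push_cast; constructor <;> omega)]
    simp only []
    have H := ih (j + 1) f (sp ++ pairSeg j) (by omega) (by omega)
    simp only [pairSeg, List.append_assoc] at H
    push_cast at H ⊢
    ring_nf at H ⊢
    simp only [List.append_assoc]
    rw [H, show 1 + n = n + 1 by omega, ← flat_succ j n]
    simp only [pairSeg, List.append_assoc]
    push_cast
    ring_nf

def ringN (K : Nat) : List (Int × Int) :=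
  seg ((K : Int)) (-(K : Int)) 0 1 (2 * K) ++ seg ((K : Int)) ((K : Int)) (-1) 0 (2 * K) ++
  seg (-(K : Int)) ((K : Int)) 0 (-1) (2 * K) ++ seg (-(K : Int)) (-(K : Int)) 1 0 (2 * K)

theorem seg_snoc (x y dx dy : Int) (n : Nat) :
    seg x y dx dy (n + 1) = seg x y dx dy n ++ [(x + ((n : Int) + 1) * dx, y + ((n : Int) + 1) * dy)] := by
  rw [seg_eq_map, seg_eq_map, List.range_succ, List.map_append, List.map_singleton]

theorem seg_congr (dx dy : Int) {x x' y y' : Int} {n n' : Nat} (hx : x = x') (hy : y = y') (hn : n = n') :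
    seg x y dx dy n = seg x' y' dx dy n' := by rw [hx, hy, hn]

theorem ringStep (D : Nat) : pairSeg D ++ lpSeg (D + 1) = lpSeg D ++ ringN (D + 1) := by
  have h1 : seg (-(D : Int)) (-(D : Int)) 1 0 (2 * D + 1) =
      seg (-(D : Int)) (-(D : Int)) 1 0 (2 * D) ++ [((D : Int) + 1, -(D : Int))] := by
    rw [seg_snoc]
    refine congrArg _ (congrArg (fun p => [p]) (Prod.ext_iff.mpr ⟨?_, ?_⟩)) <;> push_cast <;> ring
  have h2 : seg ((D : Int) + 1) (-((D : Int) + 1)) 0 1 (2 * D + 1 + 1) =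
      ((D : Int) + 1, -(D : Int)) :: seg ((D : Int) + 1) (-(D : Int)) 0 1 (2 * D + 1) := by
    rw [seg]
    exact congrArg₂ _ (Prod.ext_iff.mpr ⟨by ring, by ring⟩) (seg_congr _ _ (by ring) (by ring) rfl)
  simp only [pairSeg, lpSeg, ringN]
  push_cast
  rw [show 2 * (D + 1) = 2 * D + 1 + 1 by omega, h1, h2]
  simp only [List.append_assoc, List.cons_append, List.nil_append]
  refine congrArg _ ?_
  refine congrArg _ ?_
  refine congrArg₂ _ (seg_congr _ _ rfl rfl rfl) ?_
  refine congrArg₂ _ (seg_congr _ _ rfl rfl (by omega)) ?_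
  refine congrArg₂ _ (seg_congr _ _ (by ring) rfl (by omega)) ?_
  exact seg_congr _ _ rfl rfl rfl

theorem rings_eq : ∀ (D : Nat),
    (List.range D).flatMap pairSeg ++ lpSeg D = (List.range D).flatMap (fun i => ringN (i + 1)) := by
  intro D
  induction D with
  | zero => simp [lpSeg, seg]
  | succ D ih =>
    rw [List.range_succ, List.flatMap_append, List.flatMap_append, List.flatMap_singleton,
      List.flatMap_singleton, List.append_assoc, ringStep, ← List.append_assoc, ih]
-- ===== PORT B =====

theorem ringB_eq (i : Nat) :
    ((PySem.List.pyRange 0 (2 * (1 + (i : Int))) 1).map (fun t => ((1 + (i : Int)), -(1 + (i : Int)) + 1 + t)) ++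
     ((PySem.List.pyRange 0 (2 * (1 + (i : Int))) 1).map (fun t => ((1 + (i : Int)) - 1 - t, (1 + (i : Int)))) ++
      ((PySem.List.pyRange 0 (2 * (1 + (i : Int))) 1).map (fun t => (-(1 + (i : Int)), (1 + (i : Int)) - 1 - t)) ++
       (PySem.List.pyRange 0 (2 * (1 + (i : Int))) 1).map (fun t => (-(1 + (i : Int)) + 1 + t, -(1 + (i : Int))))))) =
    ringN (i + 1) := by
  have hr : PySem.List.pyRange 0 (2 * (1 + (i : Int))) 1 =
      (List.range (2 * (i + 1))).map (fun (a : Nat) => (a : Int)) := by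
    rw [PySem.List.pyRange_one, show ((2 * (1 + (i : Int)) - 0)).toNat = 2 * (i + 1) by omega]
    exact map_range_ext _ _ _ (fun t => by simp)
  rw [hr, ringN]
  simp only [List.map_map, List.append_assoc]
  rw [seg_eq_map, seg_eq_map, seg_eq_map, seg_eq_map]
  refine congrArg₂ _ (map_range_ext _ _ _ fun t => ?_) (congrArg₂ _ (map_range_ext _ _ _ fun t => ?_)
    (congrArg₂ _ (map_range_ext _ _ _ fun t => ?_) (map_range_ext _ _ _ fun t => ?_))) <;>
    refine Prod.ext_iff.mpr ⟨?_, ?_⟩ <;> simp only [Function.comp_apply] <;> push_cast <;> ring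

theorem alt_eq (radius : Int) :
    Generate_Square_Spiral_Traversal_Diffs_alt radius =
      [((0 : Int), (0 : Int))] ++ (List.range (radius - 1).toNat).flatMap (fun i => ringN (i + 1)) := by
  rw [Generate_Square_Spiral_Traversal_Diffs_alt]
  have hbody : (fun (sp : List (Int × Int)) (k : Int) =>
      (((sp ++ (PySem.List.pyRange 0 (2 * k) 1).map (fun t => (k, -k + 1 + t)))
            ++ (PySem.List.pyRange 0 (2 * k) 1).map (fun t => (k - 1 - t, k)))
          ++ (PySem.List.pyRange 0 (2 * k) 1).map (fun t => (-k, k - 1 - t)))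
        ++ (PySem.List.pyRange 0 (2 * k) 1).map (fun t => (-k + 1 + t, -k))) =
      (fun sp k => sp ++
        ((PySem.List.pyRange 0 (2 * k) 1).map (fun t => (k, -k + 1 + t)) ++
         ((PySem.List.pyRange 0 (2 * k) 1).map (fun t => (k - 1 - t, k)) ++
          ((PySem.List.pyRange 0 (2 * k) 1).map (fun t => (-k, k - 1 - t)) ++
           (PySem.List.pyRange 0 (2 * k) 1).map (fun t => (-k + 1 + t, -k)))))) :=
    funext fun sp => funext fun k => by rw [List.append_assoc, List.append_assoc, List.append_assoc]
  rw [hbody, PySem.List.foldl_append_eq_flatMap, PySem.List.pyRange_one, List.flatMap_map]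
  refine congrArg _ ?_
  refine congrArg₂ _ (funext fun i => ?_) rfl
  exact ringB_eq i

theorem A_eq_alt (radius : Int) :
    Generate_Square_Spiral_Traversal_Diffs radius = Generate_Square_Spiral_Traversal_Diffs_alt radius := by
  rw [Generate_Square_Spiral_Traversal_Diffs, alt_eq]
  by_cases hr : radius ≤ 1
  · simp only [spiralLoop]
    rw [spiralPhase_partial (radius - 1) 1 0 0 1 0 0 [(0, 0)] (by omega)
        (fun t ht => absurd ht (by omega))
        (by simp only [Nat.cast_zero, zero_add, one_mul, mul_zero, add_zero, abs_le]; omega)]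
    rw [show (radius - 1).toNat = 0 by omega]
    simp [seg]
  · have hDint : (((radius - 1).toNat : Nat) : Int) = radius - 1 := by omega
    have H := spiralLoop_run (radius - 1).toNat (radius - 1).toNat 0 (2 * radius.toNat + 1) [(0, 0)]
      (by omega) (by omega)
    simp only [Nat.cast_zero, neg_zero, Nat.mul_zero, Nat.zero_add] at H
    rw [hDint] at H
    rw [H, List.append_assoc]
    exact congrArg _ (rings_eq (radius - 1).toNat)

-- ===== VERDICT (by name: the statement is the Claim_ definition above) =====
theorem Generate_Square_Spiral_Traversal_Diffs_spec : Claim_equal_Generate_Square_Spiral_Traversal_Diffs := by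
  intro radius _
  exact A_eq_alt radius
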